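-- pv_equiv track=rewrite | github.com/FGG100y/lc-brain-gym | src/solu_technique/sliding_window_字符串问题/滑动窗口_最长子字符串的长度/snippet.py | max_even_os
-- ===== SOURCE A (Python) =====
-- def max_even_os(s):
--     s2 = s * 2      # 模拟环状，注意边界
--     max_len = 0
--     window = []
--     left = 0
--
--     for right in range(len(s2)):
--         num_o = sum(1 for c in window if c == "o")
--         if num_o > 2 and num_o % 2 != 0:  # 移动左端直到减去一个“o”
--             for i in range(len(window)):
--                 if window[i] == "o":
--                     left += i + 1
--                     break
--             window = window[left:]
--             max_len = max(max_len, right - left + 1)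
--         window.append(s2[right])
--
--     return max_len
-- ===== SOURCE B (Python) =====
-- def max_even_os(s):
--     # One pass with a running count of the tracked character: it is updated as characters
--     # enter the window and recomputed only when the window is cut, instead of
--     # re-summing the whole window on every iteration.
--     s2 = s * 2
--     max_len = 0
--     window = []
--     num_o = 0
--     left = 0
--     for right, c in enumerate(s2):
--         if num_o > 2 and num_o % 2 != 0:
--             left += window.index("o") + 1
--             window = window[left:]
--             num_o = window.count("o")
--             max_len = max(max_len, right - left + 1)
--         window.append(c)
--         if c == "o":
--             num_o += 1
--     return max_len
-- ===== Notes on version B (the rewrite author's own statement) =====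
-- stated objective: faster
-- what changed: B maintains a running count of the tracked character in the window (incremented on append, recomputed only at the rare shrink events) so A's per-iteration full re-sum of the window disappears.
import Mathlib
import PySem

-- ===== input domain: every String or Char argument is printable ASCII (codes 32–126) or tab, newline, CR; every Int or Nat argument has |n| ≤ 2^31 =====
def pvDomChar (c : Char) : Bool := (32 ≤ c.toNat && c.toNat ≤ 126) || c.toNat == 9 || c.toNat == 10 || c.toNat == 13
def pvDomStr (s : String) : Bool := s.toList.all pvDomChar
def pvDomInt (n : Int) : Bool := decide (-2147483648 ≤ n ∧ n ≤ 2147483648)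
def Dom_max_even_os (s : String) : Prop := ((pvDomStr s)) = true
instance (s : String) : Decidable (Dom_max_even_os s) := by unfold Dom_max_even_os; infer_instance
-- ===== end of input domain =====

-- B keeps a running count of the tracked character in the window (updated on append, recomputed only
-- when the window is cut) instead of A's full re-sum of the window every iteration
-- (objective: faster).

-- ===== PORT A =====
-- loop body of A, on state (max_len, window, left); 'for right in range(len(s2))'
-- with 's2[right]' is the fold over 'enumerate s2'
def pvStepA (st : Int × List Char × Int) (pr : Int × Char) : Int × List Char × Int :=
  let max_len := st.1
  let window := st.2.1
  let left := st.2.2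
  let right := pr.1
  -- num_o = sum(1 for c in window if c == "o")
  let num_o : Int := window.foldl (fun acc c => if c = 'o' then acc + 1 else acc) 0
  if num_o > 2 ∧ PySem.Int.mod num_o 2 ≠ 0 then
    -- for i in range(len(window)): if window[i] == "o": left += i + 1; break
    let left := left + (match window.idxOf? 'o' with
                        | some i => (i : Int) + 1
                        | none => 0)
    let window := PySem.List.slice window (some left) none   -- window = window[left:]
    let max_len := max max_len (right - left + 1)
    (max_len, window ++ [pr.2], left)                        -- window.append(s2[right])
  else
    (max_len, window ++ [pr.2], left)

def max_even_os (s : String) : Int :=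
  let s2 := s.toList ++ s.toList                             -- s2 = s * 2
  ((PySem.List.enumerate s2 0).foldl pvStepA (0, [], 0)).1

-- ===== PORT B =====
-- loop body of B, on state (max_len, window, num_o, left)
def pvStepB (st : Int × List Char × Int × Int) (pr : Int × Char) : Int × List Char × Int × Int :=
  let st' :=
    if st.2.2.1 > 2 ∧ PySem.Int.mod st.2.2.1 2 ≠ 0 then
      -- left += window.index("o") + 1   (list.index; the branch guarantees an 'o' is present)
      let left := st.2.2.2 + ((match PySem.List.index? st.2.1 'o' with
                               | some i => (i : Int)
                               | none => 0) + 1)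
      let window := PySem.List.slice st.2.1 (some left) none -- window = window[left:]
      let num_o : Int := PySem.List.count window 'o'         -- num_o = window.count("o")
      (max st.1 (pr.1 - left + 1), window, num_o, left)      -- max_len = max(max_len, right - left + 1)
    else st
  -- window.append(c); if c == "o": num_o += 1
  (st'.1, st'.2.1 ++ [pr.2],
   (if pr.2 = 'o' then st'.2.2.1 + 1 else st'.2.2.1), st'.2.2.2)

def max_even_os_alt (s : String) : Int :=
  let s2 := s.toList ++ s.toList
  ((PySem.List.enumerate s2 0).foldl pvStepB (0, [], 0, 0)).1

-- ===== PRECONDITION & SPEC =====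
def Spec_max_even_os (s : String) (out : Int) : Prop := out = max_even_os_alt s
instance (s : String) (out : Int) : Decidable (Spec_max_even_os s out) := by unfold Spec_max_even_os; infer_instance

-- ===== CLAIM (what is proved, stated in full; the proofs are below) =====
def Claim_equal_max_even_os : Prop := ∀ (s : String), Dom_max_even_os s → Spec_max_even_os s (max_even_os s)

-- ===== LEMMAS AND PROOFS =====

-- number of 'o' in a char list, as an Int
def pvCountO (L : List Char) : Int := (L.countP (fun c => decide (c = 'o')) : Int)

lemma pv_numA (w : List Char) :
    w.foldl (fun acc c => if c = 'o' then acc + 1 else acc) (0:Int) = pvCountO w := by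
  rw [PySem.List.foldl_ite_add_one]; simp [pvCountO]

lemma pv_countO_append_one (w : List Char) (c : Char) :
    pvCountO (w ++ [c]) = if c = 'o' then pvCountO w + 1 else pvCountO w := by
  by_cases h : c = 'o' <;> simp [pvCountO, List.countP_append, h]

lemma pv_count_eq (w : List Char) : (PySem.List.count w 'o' : Int) = pvCountO w := by
  simp only [PySem.List.count_eq, pvCountO, List.count_eq_countP]
  norm_cast

-- the loop invariant: B carries A's state plus num_o = #'o' in the window
lemma pv_mem_of_countO (w : List Char) (h : 2 < pvCountO w) : ∃ i, w.idxOf? 'o' = some i := by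
  have hp : 0 < w.countP (fun c => decide (c = 'o')) := by
    unfold pvCountO at h; omega
  rcases List.countP_pos_iff.mp hp with ⟨c, hc, hco⟩
  simp at hco; subst hco
  exact Option.isSome_iff_exists.mp (List.isSome_idxOf?.mpr hc)

lemma pv_loop (rest : List Char) : ∀ (r m l : Int) (w : List Char),
    ((PySem.List.enumerate rest r).foldl pvStepA (m, w, l)).1
    = ((PySem.List.enumerate rest r).foldl pvStepB (m, w, pvCountO w, l)).1 := by
  induction rest with
  | nil => intro r m l w; simp [PySem.List.enumerate]
  | cons ch t ih =>
    intro r m l w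
    rw [PySem.List.enumerate_cons]
    simp only [List.foldl_cons]
    by_cases hcond : pvCountO w > 2 ∧ PySem.Int.mod (pvCountO w) 2 ≠ 0
    · obtain ⟨iw, hiw⟩ := pv_mem_of_countO w hcond.1
      set l' : Int := l + ((iw : Int) + 1) with hl'
      have hstepA : pvStepA (m, w, l) (r, ch)
          = (max m (r - l' + 1), PySem.List.slice w (some l') none ++ [ch], l') := by
        simp only [pvStepA, pv_numA]
        rw [if_pos hcond, hiw]
      have hidx : l + ((match PySem.List.index? w 'o' with
                        | some i => (i : Int)
                        | none => 0) + 1) = l' := by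
        rw [PySem.List.index?_eq_idxOf?, hiw]
      have hstepB : pvStepB (m, w, pvCountO w, l) (r, ch)
          = (max m (r - l' + 1),
             PySem.List.slice w (some l') none ++ [ch],
             (if ch = 'o' then pvCountO (PySem.List.slice w (some l') none) + 1
              else pvCountO (PySem.List.slice w (some l') none)), l') := by
        simp only [pvStepB]
        rw [if_pos hcond]
        simp only [hidx, pv_count_eq]
      rw [hstepA, hstepB]
      rw [ih]
      congr 2
      rw [pv_countO_append_one]
    · have hstepA : pvStepA (m, w, l) (r, ch) = (m, w ++ [ch], l) := by
        simp only [pvStepA, pv_numA]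
        rw [if_neg hcond]
      have hstepB : pvStepB (m, w, pvCountO w, l) (r, ch)
          = (m, w ++ [ch],
             (if ch = 'o' then pvCountO w + 1 else pvCountO w), l) := by
        simp only [pvStepB]
        rw [if_neg hcond]
      rw [hstepA, hstepB, ih]
      congr 2
      rw [pv_countO_append_one]

-- ===== VERDICT (by name: the statement is the Claim_ definition above) =====
theorem max_even_os_spec : Claim_equal_max_even_os := by
  intro s _
  unfold Spec_max_even_os max_even_os max_even_os_alt
  have := pv_loop (s.toList ++ s.toList) 0 0 0 []
  simpa [pvCountO] using this
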